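-- pv_equiv track=rewrite | github.com/01090841589/solved_problem | eevee.py | solution
-- ===== SOURCE A (Python) =====
-- from collections import deque, defaultdict
-- from collections import defaultdict
--
-- def solution(orders):
--     answer = []
--     answer_num = 0
--     foods = defaultdict(dict)
--     for order in orders:
--         all_orders = list(order.split(" "))
--         if not foods[all_orders[0]]:
--             foods[all_orders[0]] = defaultdict(int)
--         for ord in range(1, len(all_orders)):
--             foods[all_orders[0]][all_orders[ord]] += 1
--     for customer in foods.keys():
--         if answer_num < len(foods[customer]):
--             answer_num = len(foods[customer])
--             answer= [customer]
--         elif answer_num == len(foods[customer]):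
--             answer.append(customer)
--     answer.sort()
--     return answer
-- ===== SOURCE B (Python) =====
-- def solution(orders):
--     # No per-customer map: take the sorted distinct customers, then for each
--     # customer rescan all split orders and count its distinct foods directly.
--     splits = [order.split(" ") for order in orders]
--     answer, best = [], 0
--     for customer in sorted({s[0] for s in splits}):
--         count = len({f for s in splits if s[0] == customer for f in s[1:]})
--         if count > best:
--             answer, best = [customer], count
--         elif count == best:
--             answer.append(customer)
--     return answer
-- ===== Notes on version B (the rewrite author's own statement) =====
-- stated objective: alternative
-- what changed: B builds no customer-to-foods map at all: it sorts the distinct first tokens once and, for each customer in that sorted order, rescans all split orders to count that customer's distinct foods with a set comprehension, accumulating the winners already in sorted order (no final sort), where A builds nested defaultdict counters in one grouping pass and sorts the tie list at the end.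
import Mathlib
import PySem

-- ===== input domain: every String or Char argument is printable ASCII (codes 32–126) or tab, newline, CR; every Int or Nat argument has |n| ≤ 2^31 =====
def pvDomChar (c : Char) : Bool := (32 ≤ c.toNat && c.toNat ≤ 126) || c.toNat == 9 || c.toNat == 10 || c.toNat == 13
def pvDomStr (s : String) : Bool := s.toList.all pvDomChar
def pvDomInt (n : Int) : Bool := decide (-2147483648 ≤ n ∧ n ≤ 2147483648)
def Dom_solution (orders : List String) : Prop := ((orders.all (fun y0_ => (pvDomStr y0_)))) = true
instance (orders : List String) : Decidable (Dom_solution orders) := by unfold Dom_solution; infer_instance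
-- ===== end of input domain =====

-- B builds no customer→foods map: it sorts the distinct first tokens once and, per customer in that
-- order, rescans all split orders counting its distinct foods, collecting winners already sorted
-- (objective: alternative).

-- ===== PORT A =====
-- one order line of A: defaultdict access (reset-to-empty when falsy), count each food token
def pvStepA (foods : PySem.Dict String (PySem.Dict String Int)) (order : String) :
    PySem.Dict String (PySem.Dict String Int) :=
  match PySem.Str.split? order " " with
  | some (c :: fs) =>
      let foods :=
        if foods.getD c PySem.Dict.empty = PySem.Dict.empty then
          foods.insert c PySem.Dict.empty
        else foods
      fs.foldl (fun d f =>
        d.insert c ((d.getD c PySem.Dict.empty).modify f 0 (fun v => v + 1))) foods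
  | _ => foods  -- unreachable: split with the nonempty separator " " never raises or returns []

def solution (orders : List String) : List String :=
  let foods := orders.foldl pvStepA PySem.Dict.empty
  let res := foods.keys.foldl (fun (st : List String × Int) customer =>
      if st.2 < ((foods.getD customer PySem.Dict.empty).size : Int) then
        ([customer], ((foods.getD customer PySem.Dict.empty).size : Int))
      else if st.2 = ((foods.getD customer PySem.Dict.empty).size : Int) then
        (st.1 ++ [customer], st.2)
      else st) ([], 0)
  PySem.List.sorted res.1 (fun x => x) false

-- ===== PORT B =====
-- order.split(" "); the getD [] default is never used: split? is none only for the empty separator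
def pvSplit (order : String) : List String := (PySem.Str.split? order " ").getD []

def solution_alt (orders : List String) : List String :=
  let splits := orders.map pvSplit
  -- for customer in sorted({s[0] for s in splits}): …  (s[0] as pyGetD; split " " is never empty)
  let res := (PySem.List.sorted
      (PySem.Set.ofList (splits.map (fun s => PySem.List.pyGetD s 0 "")))
      (fun x => x) false).foldl
    (fun (st : List String × Int) customer =>
      let count : Int :=
        ((PySem.Set.ofList
            ((splits.filter (fun s => PySem.List.pyGetD s 0 "" == customer)).flatMap
              (fun s => PySem.List.slice s (some 1) none))).length : Int)
      if st.2 < count then ([customer], count)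
      else if st.2 = count then (st.1 ++ [customer], st.2)
      else st) ([], 0)
  res.1

-- ===== PRECONDITION & SPEC =====
def Spec_solution (orders : List String) (out : List String) : Prop := out = solution_alt orders
instance (orders : List String) (out : List String) : Decidable (Spec_solution orders out) := by unfold Spec_solution; infer_instance

-- ===== CLAIM (what is proved, stated in full; the proofs are below) =====
def Claim_equal_solution : Prop := ∀ (orders : List String), Dom_solution orders → Spec_solution orders (solution orders)

-- ===== LEMMAS AND PROOFS =====

-- split(" ") always yields at least one piece
theorem pvGo_ne_nil (sep : List Char) (fuel : Nat) : ∀ (l cur : List Char)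
    (acc : List (List Char)), PySem.Chars.splitOn.go sep fuel l cur acc ≠ [] := by
  induction fuel with
  | zero => intro l cur acc; simp [PySem.Chars.splitOn.go]
  | succ n ih =>
    intro l cur acc
    cases l with
    | nil => simp [PySem.Chars.splitOn.go]
    | cons c rest =>
      rw [PySem.Chars.splitOn.go]
      split_ifs <;> apply ih

theorem pvSplitSome (o : String) : ∃ c fs, PySem.Str.split? o " " = some (c :: fs) := by
  have h : PySem.Chars.splitOn o.toList [' '] ≠ [] := pvGo_ne_nil _ _ _ _ _
  cases hs : PySem.Chars.splitOn o.toList [' '] with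
  | nil => exact absurd hs h
  | cons x xs =>
    refine ⟨String.ofList x, xs.map String.ofList, ?_⟩
    simp [PySem.Str.split?, PySem.Chars.split?, hs]

-- the head token and the food tokens of one order
def pvHeadTok (o : String) : String := PySem.List.pyGetD (pvSplit o) 0 ""

def pvFoods (x : String) (orders : List String) : List String :=
  ((orders.map pvSplit).filter (fun s => PySem.List.pyGetD s 0 "" == x)).flatMap
    (fun s => PySem.List.slice s (some 1) none)

-- ===== facts about A's build =====

theorem pvInsert_getD_self (d : PySem.Dict String (PySem.Dict String Int)) (c : String)
    (hc : d.contains c = true) (hnd : d.keys.Nodup) :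
    d.insert c (d.getD c PySem.Dict.empty) = d := by
  apply PySem.Dict.ext
  rw [PySem.Dict.items_insert_of_contains _ _ hc]
  conv_rhs => rw [← List.map_id d.items]
  apply List.map_congr_left
  intro p hp
  by_cases hpc : p.1 == c
  · have hpc' : p.1 = c := by simpa using hpc
    have h2 : d.getD c PySem.Dict.empty = p.2 := by
      refine PySem.Dict.getD_of_mem_items _ ?_ hnd _
      rw [← hpc']; exact hp
    rw [← hpc'] at h2 ⊢
    simp [h2]
  · simp [hpc]

theorem pvInnerCollapse (fs : List String) (d : PySem.Dict String (PySem.Dict String Int))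
    (c : String) (hc : d.contains c = true) (hnd : d.keys.Nodup) :
    fs.foldl (fun d f =>
        d.insert c ((d.getD c PySem.Dict.empty).modify f 0 (fun v => v + 1))) d
      = d.insert c (fs.foldl (fun dk f => dk.modify f 0 (fun v => v + 1))
          (d.getD c PySem.Dict.empty)) := by
  induction fs generalizing d with
  | nil => exact (pvInsert_getD_self d c hc hnd).symm
  | cons f fs ih =>
    simp only [List.foldl_cons]
    rw [ih _ (PySem.Dict.contains_insert_self _ _ _) (PySem.Dict.nodup_keys_insert _ _ _ hnd),
      PySem.Dict.getD_insert_self, PySem.Dict.insert_insert_self]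

-- A's whole step is one insert at the order's head token
theorem pvStepA_eq (d : PySem.Dict String (PySem.Dict String Int)) (o : String)
    (c : String) (fs : List String) (hnd : d.keys.Nodup)
    (hs : PySem.Str.split? o " " = some (c :: fs)) :
    pvStepA d o = d.insert c (fs.foldl (fun dk f => dk.modify f 0 (fun v => v + 1))
      (d.getD c PySem.Dict.empty)) := by
  unfold pvStepA
  rw [hs]
  by_cases h : d.getD c PySem.Dict.empty = PySem.Dict.empty
  · dsimp only
    rw [if_pos h,
      pvInnerCollapse fs _ c (PySem.Dict.contains_insert_self _ _ _)
        (PySem.Dict.nodup_keys_insert _ _ _ hnd),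
      PySem.Dict.getD_insert_self, PySem.Dict.insert_insert_self, h]
  · have hc : d.contains c = true := by
      cases hcc : d.contains c
      · exact absurd (PySem.Dict.getD_of_not_contains d _ hcc) h
      · rfl
    dsimp only
    rw [if_neg h, pvInnerCollapse fs d c hc hnd]

theorem pvKeys_insert (d : PySem.Dict String (PySem.Dict String Int)) (k : String)
    (v : PySem.Dict String Int) :
    (d.insert k v).keys = PySem.Set.add d.keys k := by
  rw [PySem.Set.add_eq_ite]
  by_cases hc : d.contains k = true
  · rw [PySem.Dict.keys_insert_of_contains _ _ hc, if_pos]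
    rw [PySem.Dict.contains_eq_decide_mem_keys] at hc
    simpa using hc
  · have hc' : d.contains k = false := by simpa using hc
    rw [PySem.Dict.keys_insert_of_not_contains _ _ hc', if_neg]
    rw [PySem.Dict.contains_eq_decide_mem_keys] at hc'
    simpa using hc'

-- after the whole build: keys are the distinct head tokens in first-appearance order,
-- and each value dict's keys are the distinct foods of that customer, in order
theorem pvBuild (orders : List String) (d : PySem.Dict String (PySem.Dict String Int))
    (hnd : d.keys.Nodup) :
    (orders.foldl pvStepA d).keys.Nodup ∧
    (orders.foldl pvStepA d).keys = PySem.Set.update d.keys (orders.map pvHeadTok) ∧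
    ∀ x, ((orders.foldl pvStepA d).getD x PySem.Dict.empty).keys
        = PySem.Set.update ((d.getD x PySem.Dict.empty).keys) (pvFoods x orders) := by
  induction orders generalizing d with
  | nil => exact ⟨hnd, rfl, fun x => rfl⟩
  | cons o os ih =>
    obtain ⟨c, fs, hs⟩ := pvSplitSome o
    have hsplit : pvSplit o = c :: fs := by simp [pvSplit, hs]
    have hhead : pvHeadTok o = c := by
      simp [pvHeadTok, hsplit, PySem.List.pyGetD_zero_cons]
    have hstep := pvStepA_eq d o c fs hnd hs
    have hnd' : (pvStepA d o).keys.Nodup := by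
      rw [hstep]; exact PySem.Dict.nodup_keys_insert _ _ _ hnd
    obtain ⟨h1, h2, h3⟩ := ih (pvStepA d o) hnd'
    simp only [List.foldl_cons]
    refine ⟨h1, ?_, ?_⟩
    · rw [h2, hstep, pvKeys_insert, List.map_cons, hhead]
      simp [PySem.Set.update]
    · intro x
      rw [h3 x]
      have hfoods : pvFoods x (o :: os)
          = (if c == x then fs else []) ++ pvFoods x os := by
        simp only [pvFoods, List.map_cons, List.filter_cons, hsplit,
          PySem.List.pyGetD_zero_cons]
        by_cases hcx : c == x
        · rw [if_pos hcx, if_pos hcx, List.flatMap_cons, PySem.List.slice_from_one]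
          rfl
        · rw [if_neg hcx, if_neg hcx]
          simp
      rw [hfoods]
      have hupd : ∀ (s : PySem.Set String) (l1 l2 : List String),
          PySem.Set.update s (l1 ++ l2) = PySem.Set.update (PySem.Set.update s l1) l2 := by
        intro s l1 l2; simp [PySem.Set.update, List.foldl_append]
      rw [hupd]
      congr 1
      rw [hstep]
      by_cases hcx : c == x
      · have hcx' : c = x := by simpa using hcx
        rw [if_pos hcx, ← hcx', PySem.Dict.getD_insert_self,
          PySem.Dict.keys_foldl_modify fs 0 (fun _ _ v => v + 1)]
      · have hcx' : ¬ (c = x) := by simpa using hcx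
        rw [if_neg hcx]
        have : (d.insert c (fs.foldl (fun dk f => dk.modify f 0 (fun v => v + 1))
            (d.getD c PySem.Dict.empty))).getD x PySem.Dict.empty
            = d.getD x PySem.Dict.empty := by
          rw [PySem.Dict.getD, PySem.Dict.getD,
            PySem.Dict.get?_insert_of_ne _ _ (fun h => hcx' h.symm)]
          simp [PySem.Dict.getD]
        rw [this]
        rfl

-- the shared running-max / tie-append loop, over any key list and weight n
theorem pvFoldMax_char (n : String → Int) (ks : List String) (h0 : ∀ c ∈ ks, 0 ≤ n c) :
    ks.foldl (fun (st : List String × Int) c =>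
        if st.2 < n c then ([c], n c)
        else if st.2 = n c then (st.1 ++ [c], st.2)
        else st) ([], 0)
      = (ks.filter (fun c => n c == (ks.map n).foldl max 0), (ks.map n).foldl max 0) := by
  induction ks using List.reverseRecOn with
  | nil => simp
  | append_singleton ks c ih =>
    have h0' : ∀ x ∈ ks, 0 ≤ n x := fun x hx => h0 x (List.mem_append_left _ hx)
    have hall : ∀ x ∈ ks, n x ≤ (ks.map n).foldl max 0 := fun x hx =>
      (PySem.List.le_foldl_max (ks.map n) 0).2 _ (List.mem_map_of_mem hx)
    rw [List.foldl_append, ih h0', List.map_append, List.foldl_append]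
    simp only [List.foldl_cons, List.foldl_nil, List.filter_append, List.filter_cons,
      List.filter_nil]
    rcases lt_trichotomy ((ks.map n).foldl max 0) (n c) with h | h | h
    · have hmx : max ((ks.map n).foldl max 0) (n c) = n c := max_eq_right h.le
      have hnil : ks.filter (fun x => n x == n c) = [] :=
        List.filter_eq_nil_iff.2 (fun x hx hbx => by
          have := hall x hx
          have : n x = n c := by simpa using hbx
          omega)
      simp [hmx, h, hnil]
    · have hmx : max ((ks.map n).foldl max 0) (n c) = n c := by omega
      simp [h]
    · have hmx : max ((ks.map n).foldl max 0) (n c) = (ks.map n).foldl max 0 := by omega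
      have hne : ¬ ((ks.map n).foldl max 0 < n c) := by omega
      have hne2 : ¬ ((ks.map n).foldl max 0 = n c) := by omega
      have hbc : (n c == (ks.map n).foldl max 0) = false := by
        simp; omega
      simp [hmx, hne, hne2, hbc]

theorem solution_eq_alt (orders : List String) : solution orders = solution_alt orders := by
  obtain ⟨hnd, hkeys, hvals⟩ := pvBuild orders PySem.Dict.empty PySem.Dict.nodup_keys_empty
  set d := orders.foldl pvStepA PySem.Dict.empty with hd
  set n : String → Int := fun c => ((d.getD c PySem.Dict.empty).size : Int) with hn
  have h0 : ∀ c, 0 ≤ n c := fun c => Int.natCast_nonneg _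
  set S : List String := PySem.List.sorted d.keys (fun x => x) false with hS
  set M : Int := (d.keys.map n).foldl max 0 with hM
  -- B's head-token set is exactly d.keys
  have hkeys' : PySem.Set.ofList ((orders.map pvSplit).map (fun s => PySem.List.pyGetD s 0 ""))
      = d.keys := by
    rw [List.map_map, hkeys]; rfl
  have hSdef : PySem.List.sorted
      (PySem.Set.ofList ((orders.map pvSplit).map (fun s => PySem.List.pyGetD s 0 "")))
      (fun x => x) false = S := by rw [hkeys']
  -- B's per-customer distinct-food count is n
  have hcount : ∀ x : String,
      ((PySem.Set.ofList
          (((orders.map pvSplit).filter (fun s => PySem.List.pyGetD s 0 "" == x)).flatMap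
            (fun s => PySem.List.slice s (some 1) none))).length : Int) = n x := by
    intro x
    have : PySem.Set.ofList (pvFoods x orders) = (d.getD x PySem.Dict.empty).keys := by
      rw [hvals x]; rfl
    show ((PySem.Set.ofList (pvFoods x orders)).length : Int) = n x
    rw [this, hn]
    simp [PySem.Dict.keys, PySem.Dict.size]
  -- the two maxima agree (S is a permutation of d.keys)
  have hperm : S.Perm d.keys := PySem.List.sorted_perm _ _ _
  have hMM : (S.map n).foldl max 0 = M := by
    rw [hM]
    exact (hperm.map n).foldl_eq 0
  -- A's loop, characterised
  have hA : solution orders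
      = PySem.List.sorted (d.keys.filter (fun c => n c == M)) (fun x => x) false := by
    show PySem.List.sorted (d.keys.foldl (fun (st : List String × Int) c =>
        if st.2 < n c then ([c], n c)
        else if st.2 = n c then (st.1 ++ [c], st.2) else st) ([], 0)).1 (fun x => x) false = _
    rw [pvFoldMax_char n d.keys (fun c _ => h0 c)]
  -- B's loop, characterised
  have hB : solution_alt orders = S.filter (fun c => n c == M) := by
    show ((PySem.List.sorted
        (PySem.Set.ofList ((orders.map pvSplit).map (fun s => PySem.List.pyGetD s 0 "")))
        (fun x => x) false).foldl
      (fun (st : List String × Int) customer =>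
        let count : Int :=
          ((PySem.Set.ofList
              (((orders.map pvSplit).filter (fun s => PySem.List.pyGetD s 0 "" == customer)).flatMap
                (fun s => PySem.List.slice s (some 1) none))).length : Int)
        if st.2 < count then ([customer], count)
        else if st.2 = count then (st.1 ++ [customer], st.2)
        else st) ([], 0)).1 = _
    rw [hSdef]
    have hcongr : S.foldl
        (fun (st : List String × Int) customer =>
          let count : Int :=
            ((PySem.Set.ofList
                (((orders.map pvSplit).filter (fun s => PySem.List.pyGetD s 0 "" == customer)).flatMap
                  (fun s => PySem.List.slice s (some 1) none))).length : Int)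
          if st.2 < count then ([customer], count)
          else if st.2 = count then (st.1 ++ [customer], st.2)
          else st) ([], 0)
        = S.foldl (fun (st : List String × Int) c =>
          if st.2 < n c then ([c], n c)
          else if st.2 = n c then (st.1 ++ [c], st.2)
          else st) ([], 0) := by
      apply PySem.List.foldl_congr_mem
      intro acc x _
      simp only [hcount x]
    rw [hcongr, pvFoldMax_char n S (fun c _ => h0 c), hMM]
  rw [hA, hB]
  -- A sorts its filtered keys; B filters the sorted keys: same list
  have hSlt : S.Pairwise (· < ·) := by
    rw [hS, ← hkeys']
    exact PySem.List.sorted_ofList_pairwise_lt _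
  exact PySem.List.sorted_eq_of_perm_of_pairwise_lt _ _ _
    (hperm.filter _) (List.Pairwise.filter _ hSlt)

-- ===== VERDICT (by name: the statement is the Claim_ definition above) =====
theorem solution_spec : Claim_equal_solution := by
  intro orders _
  exact solution_eq_alt orders
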